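-- pv_equiv track=rewrite | github.com/Molkree/AdventOfCode | 2022/python/day15.py | remove_point
-- ===== SOURCE A (Python) =====
-- def remove_point(intervals: list[tuple[int, int]], x: int) -> list[tuple[int, int]]:
--     """Remove point from list of intervals, splitting intervals if necessary."""
--     for i, (start, end) in enumerate(intervals):
--         if start <= x <= end:
--             if start == end:
--                 del intervals[i]
--             elif start == x:
--                 intervals[i] = (start + 1, end)
--             elif end == x:
--                 intervals[i] = (start, end - 1)
--             else:
--                 intervals[i] = (start, x - 1)
--                 intervals.insert(i + 1, (x + 1, end))
--             break
--     return intervals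
-- ===== SOURCE B (Python) =====
-- def remove_point(intervals: list[tuple[int, int]], x: int) -> list[tuple[int, int]]:
--     """Remove point from list of intervals, splitting intervals if necessary."""
--     def go(rest):
--         if not rest:
--             return []
--         start, end = rest[0]
--         if start <= x <= end:
--             return [seg for seg in ((start, x - 1), (x + 1, end)) if seg[0] <= seg[1]] + rest[1:]
--         return [rest[0]] + go(rest[1:])
--     intervals[:] = go(intervals)
--     return intervals
-- ===== Notes on version B (the rewrite author's own statement) =====
-- stated objective: simpler
-- what changed: Replaces the indexed in-place scan with four mutation branches (del/set/set/insert) by a structural recursion that rebuilds the list, handling all cases uniformly by keeping the nonempty halves (start,x-1) and (x+1,end) of the first matching interval; the in-place mutation is preserved via a full slice assignment.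
import Mathlib
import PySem

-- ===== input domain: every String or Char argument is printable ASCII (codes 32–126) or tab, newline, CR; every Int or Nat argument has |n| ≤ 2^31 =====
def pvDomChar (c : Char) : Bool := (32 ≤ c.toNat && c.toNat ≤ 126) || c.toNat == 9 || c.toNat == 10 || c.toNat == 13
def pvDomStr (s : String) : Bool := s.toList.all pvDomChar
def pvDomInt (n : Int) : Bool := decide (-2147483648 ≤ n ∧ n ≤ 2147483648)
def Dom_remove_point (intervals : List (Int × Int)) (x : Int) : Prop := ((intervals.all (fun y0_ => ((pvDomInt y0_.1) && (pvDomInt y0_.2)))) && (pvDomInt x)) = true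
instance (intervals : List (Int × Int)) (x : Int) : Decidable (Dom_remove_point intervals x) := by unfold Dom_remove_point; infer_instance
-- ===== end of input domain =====

-- B replaces A's indexed four-branch in-place mutation (del/set/set/insert) by a structural
-- recursion that rebuilds the list, keeping the nonempty halves of the first matching interval.
-- Both Pythons mutate the argument list in place to the same final content; the equivalence
-- proved here is about the returned value.

-- ===== PORT A =====
-- A scans the list with an index; on the first interval containing x it performs one of the
-- four mutations on the whole list at index i and breaks. The loop is ported as recursion over
-- the remaining suffix carrying the index i and the (unchanged-so-far) whole list cur.
def remove_point_loopA (x : Int) (cur : List (Int × Int)) (i : Nat) :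
    List (Int × Int) → List (Int × Int)
  | [] => cur
  | (start, «end») :: tl =>
    if start ≤ x ∧ x ≤ «end» then
      if start = «end» then cur.eraseIdx i
      else if start = x then cur.set i (start + 1, «end»)
      else if «end» = x then cur.set i (start, «end» - 1)
      else (cur.set i (start, x - 1)).insertIdx (i + 1) (x + 1, «end»)
    else remove_point_loopA x cur (i + 1) tl

def remove_point (intervals : List (Int × Int)) (x : Int) : List (Int × Int) :=
  remove_point_loopA x intervals 0 intervals

-- ===== PORT B =====
def remove_point_go (x : Int) : List (Int × Int) → List (Int × Int)
  | [] => []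
  | (start, «end») :: tl =>
    if start ≤ x ∧ x ≤ «end» then
      ((if start ≤ x - 1 then [(start, x - 1)] else []) ++
       (if x + 1 ≤ «end» then [(x + 1, «end»)] else [])) ++ tl
    else (start, «end») :: remove_point_go x tl

def remove_point_alt (intervals : List (Int × Int)) (x : Int) : List (Int × Int) :=
  remove_point_go x intervals

-- ===== PRECONDITION & SPEC =====
def Spec_remove_point (intervals : List (Int × Int)) (x : Int) (out : List (Int × Int)) : Prop := out = remove_point_alt intervals x
instance (intervals : List (Int × Int)) (x : Int) (out : List (Int × Int)) : Decidable (Spec_remove_point intervals x out) := by unfold Spec_remove_point; infer_instance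

-- ===== CLAIM (what is proved, stated in full; the proofs are below) =====
def Claim_equal_remove_point : Prop := ∀ (intervals : List (Int × Int)) (x : Int), Dom_remove_point intervals x → Spec_remove_point intervals x (remove_point intervals x)

-- ===== LEMMAS AND PROOFS =====

theorem pv_eraseIdx_mid (pre tl : List (Int × Int)) (a : Int × Int) :
    (pre ++ a :: tl).eraseIdx pre.length = pre ++ tl := by
  induction pre with
  | nil => simp
  | cons h t ih => simp [ih]

theorem pv_set_mid (pre tl : List (Int × Int)) (a b : Int × Int) :
    (pre ++ a :: tl).set pre.length b = pre ++ b :: tl := by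
  induction pre with
  | nil => simp
  | cons h t ih => simp [ih]

theorem pv_insertIdx_mid (pre tl : List (Int × Int)) (a b : Int × Int) :
    (pre ++ a :: tl).insertIdx (pre.length + 1) b = pre ++ a :: b :: tl := by
  induction pre with
  | nil => simp [List.insertIdx]
  | cons h t ih =>
    simp only [List.insertIdx, List.modifyTailIdx] at ih ⊢
    simp [List.modifyTailIdx.go, ih]

theorem remove_point_main (x : Int) (rest pre : List (Int × Int)) :
    remove_point_loopA x (pre ++ rest) pre.length rest = pre ++ remove_point_go x rest := by
  induction rest generalizing pre with
  | nil => simp [remove_point_loopA, remove_point_go]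
  | cons hd tl ih =>
    obtain ⟨s, e⟩ := hd
    by_cases hm : s ≤ x ∧ x ≤ e
    · obtain ⟨hx1, hx2⟩ := hm
      simp only [remove_point_loopA, remove_point_go, if_pos (And.intro hx1 hx2)]
      by_cases h1 : s = e
      · rw [if_pos h1, pv_eraseIdx_mid]
        have : ¬ s ≤ x - 1 := by omega
        have : ¬ x + 1 ≤ e := by omega
        simp [*]
      · rw [if_neg h1]
        by_cases h2 : s = x
        · rw [if_pos h2, pv_set_mid]
          have : ¬ s ≤ x - 1 := by omega
          have : x + 1 ≤ e := by omega
          simp [*]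
        · rw [if_neg h2]
          by_cases h3 : e = x
          · rw [if_pos h3, pv_set_mid]
            have : s ≤ x - 1 := by omega
            have : ¬ x + 1 ≤ e := by omega
            simp [*]
          · rw [if_neg h3, pv_set_mid, pv_insertIdx_mid]
            have : s ≤ x - 1 := by omega
            have : x + 1 ≤ e := by omega
            simp [*]
    · have hsplit : pre ++ (s, e) :: tl = (pre ++ [(s, e)]) ++ tl := by simp
      simp only [remove_point_loopA, remove_point_go, if_neg hm, hsplit]
      simpa using ih (pre ++ [(s, e)])

-- ===== VERDICT (by name: the statement is the Claim_ definition above) =====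
theorem remove_point_spec : Claim_equal_remove_point := by
  intro intervals x _
  unfold Spec_remove_point remove_point remove_point_alt
  simpa using remove_point_main x intervals []
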